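-- pv_equiv track=rewrite | github.com/OpportunV/adventofcode | 2018/day5.py | part_one
-- ===== SOURCE A (Python) =====
-- from collections import deque
--
-- def part_one(inp):
--     stack = deque()
--     for let in inp:
--         if stack and let == stack[-1].swapcase():
--             stack.pop()
--         else:
--             stack.append(let)
--
--     return len(stack)
-- ===== SOURCE B (Python) =====
-- def part_one(inp):
--     poly = list(inp)
--     while True:
--         out = []
--         i = 0
--         n = len(poly)
--         while i < n:
--             if i + 1 < n and poly[i].swapcase() == poly[i + 1]:
--                 i += 2
--             else:
--                 out.append(poly[i])
--                 i += 1
--         if len(out) == len(poly):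
--             break
--         poly = out
--     return len(poly)
-- ===== Notes on version B (the rewrite author's own statement) =====
-- stated objective: alternative
-- what changed: Replaces the one-pass stack reducer with a fixed-point repeated-scan reducer: each round rebuilds the list skipping adjacent swapcase pairs, repeating until a full pass removes nothing, then returns the length.
import Mathlib
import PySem

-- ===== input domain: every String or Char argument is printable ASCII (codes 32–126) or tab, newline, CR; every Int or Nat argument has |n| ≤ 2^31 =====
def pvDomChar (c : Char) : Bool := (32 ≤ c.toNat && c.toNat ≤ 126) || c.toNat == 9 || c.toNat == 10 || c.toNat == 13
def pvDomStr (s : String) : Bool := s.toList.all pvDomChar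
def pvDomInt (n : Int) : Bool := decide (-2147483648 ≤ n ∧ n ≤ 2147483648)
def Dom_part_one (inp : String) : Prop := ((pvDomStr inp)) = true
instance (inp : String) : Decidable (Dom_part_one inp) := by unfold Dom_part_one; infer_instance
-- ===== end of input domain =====

-- B replaces A's single-pass stack reducer by a fixed-point repeated-scan reducer
-- (rescan removing adjacent swapcase pairs until a pass removes nothing); alternative, not faster.

-- ===== PORT A =====
-- str.swapcase, exact on the ASCII domain (Dom restricts chars to codes 9,10,13,32–126)
def pySwapcase (c : Char) : Char :=
  if 'a' ≤ c ∧ c ≤ 'z' then Char.ofNat (c.toNat - 32)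
  else if 'A' ≤ c ∧ c ≤ 'Z' then Char.ofNat (c.toNat + 32) else c

-- one iteration of A's loop body: 'if stack and let == stack[-1].swapcase(): pop else: append'
-- (stack top kept at the head of the list)
def stepA (st : List Char) (c : Char) : List Char :=
  match st with
  | d :: t => if c = pySwapcase d then t else c :: st
  | [] => [c]

def part_one (inp : String) : Int :=
  Int.ofNat (inp.toList.foldl stepA []).length

-- ===== PORT B =====
-- one round of B's inner while loop: left-to-right, skip an adjacent swapcase pair, else keep
def onePass : List Char → List Char
  | [] => []
  | [a] => [a]
  | a :: b :: t => if pySwapcase a = b then onePass t else a :: onePass (b :: t)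

-- termination measure for the outer while loop of B (cited in reduceFix's decreasing_by)
theorem onePass_shrink : ∀ xs : List Char, onePass xs = xs ∨ (onePass xs).length + 2 ≤ xs.length := by
  intro xs
  induction xs using onePass.induct with
  | case1 => left; rfl
  | case2 a => left; rfl
  | case3 a t ih =>
    right
    rw [show onePass (a :: pySwapcase a :: t) = onePass t by simp [onePass]]
    rcases ih with h1 | h1
    · rw [h1]; simp
    · simp; omega
  | case4 a b t h ih =>
    rw [show onePass (a :: b :: t) = a :: onePass (b :: t) by simp [onePass, if_neg h]]
    rcases ih with h1 | h1
    · left; rw [h1]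
    · right; simp at h1 ⊢; omega

-- B's outer 'while True' loop: repeat onePass until a pass removes nothing
def reduceFix (xs : List Char) : List Char :=
  let y := onePass xs
  if y.length = xs.length then xs else reduceFix y
termination_by xs.length
decreasing_by
  rename_i hne
  rcases onePass_shrink xs with h | h
  · exact absurd (congrArg List.length h) hne
  · show (onePass xs).length < xs.length
    omega

def part_one_alt (inp : String) : Int :=
  Int.ofNat (reduceFix inp.toList).length

-- ===== PRECONDITION & SPEC =====
def Spec_part_one (inp : String) (out : Int) : Prop := out = part_one_alt inp
instance (inp : String) (out : Int) : Decidable (Spec_part_one inp out) := by unfold Spec_part_one; infer_instance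

-- ===== CLAIM (what is proved, stated in full; the proofs are below) =====
def Claim_equal_part_one : Prop := ∀ (inp : String), Dom_part_one inp → Spec_part_one inp (part_one inp)

-- ===== LEMMAS AND PROOFS =====

theorem char_le_iff (a b : Char) : (a ≤ b) ↔ a.toNat ≤ b.toNat := by
  rw [Char.le_def, UInt32.le_iff_toNat_le]; rfl

theorem toNat_ofNat' (n : Nat) (h : n < 55296) : (Char.ofNat n).toNat = n := by
  rw [Char.toNat_ofNat, if_pos (Or.inl h)]

theorem swap_invol (c : Char) : pySwapcase (pySwapcase c) = c := by
  unfold pySwapcase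
  have h97 : ('a' : Char).toNat = 97 := rfl
  have h122 : ('z' : Char).toNat = 122 := rfl
  have h65 : ('A' : Char).toNat = 65 := rfl
  have h90 : ('Z' : Char).toNat = 90 := rfl
  simp only [char_le_iff, h97, h122, h65, h90]
  by_cases h1 : 97 ≤ c.toNat ∧ c.toNat ≤ 122
  · have ht : (Char.ofNat (c.toNat - 32)).toNat = c.toNat - 32 := toNat_ofNat' _ (by omega)
    rw [if_pos h1, if_neg (by rw [ht]; omega), if_pos (by rw [ht]; omega), ht]
    have : c.toNat - 32 + 32 = c.toNat := by omega
    rw [this, Char.ofNat_toNat]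
  · by_cases h2 : 65 ≤ c.toNat ∧ c.toNat ≤ 90
    · have ht : (Char.ofNat (c.toNat + 32)).toNat = c.toNat + 32 := toNat_ofNat' _ (by omega)
      rw [if_neg h1, if_pos h2, if_pos (by rw [ht]; omega), ht]
      have : c.toNat + 32 - 32 = c.toNat := by omega
      rw [this, Char.ofNat_toNat]
    · rw [if_neg h1, if_neg h2, if_neg h1, if_neg h2]

-- an irreducible polymer: no adjacent swapcase pair, left to right
def Irr (p : List Char) : Prop := List.IsChain (fun x y => pySwapcase x ≠ y) p

-- the stack invariant of A: the top (head) never reacts with the element below it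
def IrrS (st : List Char) : Prop := List.IsChain (fun x y => pySwapcase y ≠ x) st

theorem irrS_step (st : List Char) (c : Char) (h : IrrS st) : IrrS (stepA st c) := by
  match st with
  | [] => simp [IrrS, stepA]
  | d :: t =>
    unfold IrrS
    by_cases hc : c = pySwapcase d
    · simp only [stepA, if_pos hc]
      exact h.tail
    · simp only [stepA, if_neg hc]
      exact List.isChain_cons_cons.mpr ⟨fun he => hc he.symm, h⟩

theorem foldl_onePass : ∀ (xs st : List Char), IrrS st →
    List.foldl stepA st (onePass xs) = List.foldl stepA st xs := by
  intro xs
  induction xs using onePass.induct with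
  | case1 => intro st _; rfl
  | case2 a => intro st _; rfl
  | case3 a t ih =>
    intro st hst
    rw [show onePass (a :: pySwapcase a :: t) = onePass t by simp [onePass]]
    have key : stepA (stepA st a) (pySwapcase a) = st := by
      match st with
      | [] => simp [stepA]
      | d :: st' =>
        by_cases hpop : a = pySwapcase d
        · have hd : d = pySwapcase a := by rw [hpop, swap_invol]
          simp only [stepA, if_pos hpop]
          rw [← hd]
          match st' with
          | [] => simp
          | e :: st'' =>
            have hne : pySwapcase e ≠ d := (List.isChain_cons_cons.mp hst).1
            have hnd : ¬ d = pySwapcase e := fun hx => hne (Eq.symm hx)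
            simp only [if_neg hnd]
        · simp only [stepA, if_neg hpop]
          simp
    simp only [List.foldl_cons, key]
    exact ih st hst
  | case4 a b t h ih =>
    intro st hst
    rw [show onePass (a :: b :: t) = a :: onePass (b :: t) by simp [onePass, if_neg h]]
    simp only [List.foldl_cons]
    exact ih (stepA st a) (irrS_step st a hst)

theorem onePass_le (xs : List Char) : (onePass xs).length ≤ xs.length := by
  rcases onePass_shrink xs with h | h
  · rw [h]
  · omega

theorem irr_of_fix : ∀ p : List Char, onePass p = p → Irr p := by
  intro p
  induction p using onePass.induct with
  | case1 => intro _; simp [Irr]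
  | case2 a => intro _; simp [Irr]
  | case3 a t ih =>
    intro hfix
    rw [show onePass (a :: pySwapcase a :: t) = onePass t by simp [onePass]] at hfix
    have h1 := onePass_le t
    have h2 := congrArg List.length hfix
    simp at h2
    omega
  | case4 a b t h ih =>
    intro hfix
    rw [show onePass (a :: b :: t) = a :: onePass (b :: t) by simp [onePass, if_neg h]] at hfix
    simp only [List.cons.injEq, true_and] at hfix
    exact List.isChain_cons_cons.mpr ⟨h, ih hfix⟩

theorem stack_of_irr : ∀ (p : List Char), Irr p → ∀ (st : List Char),
    (∀ h t d t', p = h :: t → st = d :: t' → h ≠ pySwapcase d) →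
    List.foldl stepA st p = p.reverse ++ st := by
  intro p
  induction p with
  | nil => intro _ st _; simp
  | cons h t ih =>
    intro hirr st hcond
    have hstep : stepA st h = h :: st := by
      match st with
      | [] => rfl
      | d :: st' => simp only [stepA, if_neg (hcond h t d st' rfl rfl)]
    rw [List.foldl_cons, hstep]
    rw [ih hirr.tail (h :: st) ?cond]
    · simp
    case cond =>
      intro h2 t2 d t' hp hs
      injection hs with hd _
      rw [hp] at hirr
      have hne : pySwapcase h ≠ h2 := (List.isChain_cons_cons.mp hirr).1
      rw [← hd]
      exact fun hx => hne (Eq.symm hx)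

theorem main_len : ∀ (xs : List Char),
    (List.foldl stepA [] xs).length = (reduceFix xs).length := by
  intro xs
  induction xs using reduceFix.induct with
  | case1 xs y hfix =>
    have heq : onePass xs = xs := by
      rcases onePass_shrink xs with h | h
      · exact h
      · have : (onePass xs).length = xs.length := hfix
        omega
    have hirr := irr_of_fix xs heq
    rw [stack_of_irr xs hirr [] (by intro _ _ _ _ _ hs; cases hs)]
    rw [reduceFix]
    have : (onePass xs).length = xs.length := hfix
    simp [this]
  | case2 xs y hfix ih =>
    have hIrrS : IrrS ([] : List Char) := by simp [IrrS]
    rw [← foldl_onePass xs [] hIrrS]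
    have hne : ¬ (onePass xs).length = xs.length := hfix
    rw [reduceFix, if_neg hne]
    exact ih

-- ===== VERDICT (by name: the statement is the Claim_ definition above) =====
theorem part_one_spec : Claim_equal_part_one := by
  intro inp _
  unfold Spec_part_one part_one part_one_alt
  rw [main_len]
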